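-- pv_equiv track=rewrite | github.com/leejaerim/Algorithm | Programmers/혼자놀기의 달인/혼자놀기의 달인.py | solution
-- ===== SOURCE A (Python) =====
-- def solution(cards:list)->int:
--     isOpend = [0] * len(cards) #isOpend = list(map(lambda x : 0, range(len(cards))))
--     ans = []
--     for i in range(len(isOpend)):
--         temp = []
--         j = i
--         while isOpend[j] == 0:
--             isOpend[j] = 1
--             temp.append(cards[j])
--             j = cards[j] - 1
--         if temp : ans.append(len(temp))
--     if len(ans) <= 1 : return 0
--     ans = sorted(ans,reverse=True)
--     return ans[0]*ans[1]
-- ===== SOURCE B (Python) =====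
-- def solution(cards: list) -> int:
--     n = len(cards)
--     # first[j] = smallest start index whose forward walk reaches slot j (every slot reaches itself)
--     first = list(range(n))
--     for s in range(n):
--         j = s
--         for _ in range(n):
--             first[j] = min(first[j], s)
--             j = cards[j] - 1
--     counts = {}
--     for r in first:
--         counts[r] = counts.get(r, 0) + 1
--     vals = sorted(counts.values(), reverse=True)
--     if len(vals) >= 2:
--         return vals[0] * vals[1]
--     return 0
-- ===== Notes on version B (the rewrite author's own statement) =====
-- stated objective: alternative
-- what changed: Replaces the visited-array early-terminating cycle walk (collecting each walk's length on the fly) by a min-label relaxation: every slot gets the smallest start index that reaches it, a counter then groups slots by label and the two largest group sizes are multiplied.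
import Mathlib
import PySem

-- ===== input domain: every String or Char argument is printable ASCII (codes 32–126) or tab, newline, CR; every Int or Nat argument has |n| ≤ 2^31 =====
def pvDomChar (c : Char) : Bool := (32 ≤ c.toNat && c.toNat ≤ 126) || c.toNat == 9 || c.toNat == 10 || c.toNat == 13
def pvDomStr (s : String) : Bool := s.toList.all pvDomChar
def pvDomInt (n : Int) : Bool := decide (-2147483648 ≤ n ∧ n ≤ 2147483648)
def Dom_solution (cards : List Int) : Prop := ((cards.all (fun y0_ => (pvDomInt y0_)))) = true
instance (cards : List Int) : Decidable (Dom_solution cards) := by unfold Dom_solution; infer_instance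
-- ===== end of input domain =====

-- B replaces A's visited-array cycle walk by a min-start-label relaxation plus a counter; alternative decomposition, not faster.

-- ===== PORT A =====
-- the Python 'while isOpend[j] == 0' loop; the fuel only totalizes it (each pass marks a slot, so n+1 always suffices on admitted inputs)
def pvWalkA (cards : List Int) (isOp : List Int) (temp : List Int) (j : Int) : Nat → List Int × List Int
  | 0 => (isOp, temp)
  | (fuel+1) =>
    if PySem.List.pyGetD isOp j 1 = 0 then
      pvWalkA cards (PySem.List.pySetD isOp j 1) (temp ++ [PySem.List.pyGetD cards j 0])
        (PySem.List.pyGetD cards j 0 - 1) fuel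
    else (isOp, temp)

def solution (cards : List Int) : Int :=
  let n := cards.length
  let res := (List.range n).foldl
    (fun (st : List Int × List Int) i =>
      let w := pvWalkA cards st.1 [] ((i : Nat) : Int) (n+1)
      if w.2 ≠ [] then (w.1, st.2 ++ [(w.2.length : Int)]) else (w.1, st.2))
    (List.replicate n 0, [])
  if res.2.length ≤ 1 then 0
  else
    let s := PySem.List.sorted res.2 (fun x => x) true
    PySem.List.pyGetD s 0 0 * PySem.List.pyGetD s 1 0

-- ===== PORT B =====
def solution_alt (cards : List Int) : Int :=
  let n := cards.length
  let first0 : List Int := (List.range n).map (fun j => ((j : Nat) : Int))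
  let first := (List.range n).foldl
    (fun (f : List Int) s =>
      ((List.range n).foldl
        (fun (st : List Int × Int) _ =>
          (PySem.List.pySetD st.1 st.2 (min (PySem.List.pyGetD st.1 st.2 0) ((s : Nat) : Int)),
           PySem.List.pyGetD cards st.2 0 - 1))
        (f, ((s : Nat) : Int))).1)
    first0
  let counts := first.foldl (fun (d : PySem.Dict Int Int) r => d.insert r (d.getD r 0 + 1)) PySem.Dict.empty
  let vals := PySem.List.sorted (PySem.Dict.values counts) (fun x => x) true
  if 2 ≤ vals.length then PySem.List.pyGetD vals 0 0 * PySem.List.pyGetD vals 1 0 else 0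

-- ===== PRECONDITION & SPEC =====
-- Pre_ is exactly where the Python A returns: some value 1-n ≤ c ≤ n at every position; any other value is
-- reached by A's sweep (every index is a start) and indexes isOpend out of range, an IndexError.
def Pre_solution (cards : List Int) : Prop :=
  ∀ c ∈ cards, 1 - (cards.length : Int) ≤ c ∧ c ≤ (cards.length : Int)
instance (cards : List Int) : Decidable (Pre_solution cards) := by unfold Pre_solution; infer_instance
def pvWitness_solution : List Int := [2, 1, 3]
def Spec_solution (cards : List Int) (out : Int) : Prop := out = solution_alt cards
instance (cards : List Int) (out : Int) : Decidable (Spec_solution cards out) := by unfold Spec_solution; infer_instance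

-- ===== CLAIM (what is proved, stated in full; the proofs are below) =====
def Claim_equal_solution : Prop := ∀ (cards : List Int), Dom_solution cards → Pre_solution cards → Spec_solution cards (solution cards)

-- ===== LEMMAS AND PROOFS =====

-- wrap of a Python index
def pvWrap (n : ℕ) (i : ℤ) : ℕ := (i % (n : ℤ)).toNat

lemma pvWrap_lt (n : ℕ) (hn : 0 < n) (i : ℤ) : pvWrap n i < n := by
  have h := Int.emod_nonneg i (b := (n:ℤ)) (by exact_mod_cast hn.ne')
  have h2 := Int.emod_lt_of_pos i (b := (n:ℤ)) (by exact_mod_cast hn)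
  unfold pvWrap; omega

lemma pvIdx_wrap (n : ℕ) (hn : 0 < n) (i : ℤ) (h1 : -(n:ℤ) ≤ i) (h2 : i < (n:ℤ)) :
    PySem.List.pyIdx? n i = some (pvWrap n i) := by
  unfold PySem.List.pyIdx? pvWrap
  by_cases h0 : 0 ≤ i
  · have : i % (n:ℤ) = i := Int.emod_eq_of_lt h0 h2
    simp [h0, h2, this]
  · have hi : i % (n:ℤ) = i + n := by
      have : (i + n) % (n:ℤ) = i % n := by simp [Int.add_mul_emod_self_left]
      rw [← this, Int.emod_eq_of_lt (by omega) (by omega)]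
    simp only [if_neg h0, if_pos h1]
    congr 1
    omega

lemma pvWrap_coe (n : ℕ) (u : ℕ) (hu : u < n) : pvWrap n (u : ℤ) = u := by
  unfold pvWrap
  rw [Int.emod_eq_of_lt (by positivity) (by exact_mod_cast hu)]
  simp

lemma pvGetD_mapRange (n : ℕ) (hn : 0 < n) (h : ℕ → ℤ) (i : ℤ) (d : ℤ)
    (h1 : -(n:ℤ) ≤ i) (h2 : i < (n:ℤ)) :
    PySem.List.pyGetD ((List.range n).map h) i d = h (pvWrap n i) := by
  unfold PySem.List.pyGetD PySem.List.pyGet?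
  rw [show ((List.range n).map h).length = n by simp, pvIdx_wrap n hn i h1 h2]
  have := pvWrap_lt n hn i
  simp [List.getElem?_map, List.getElem?_range, this]

lemma pvSetD_mapRange (n : ℕ) (hn : 0 < n) (h : ℕ → ℤ) (i : ℤ) (v : ℤ)
    (h1 : -(n:ℤ) ≤ i) (h2 : i < (n:ℤ)) :
    PySem.List.pySetD ((List.range n).map h) i v
      = (List.range n).map (fun u => if u = pvWrap n i then v else h u) := by
  unfold PySem.List.pySetD PySem.List.pySet?
  rw [show ((List.range n).map h).length = n by simp, pvIdx_wrap n hn i h1 h2]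
  simp only [Option.map_some, Option.getD_some]
  apply List.ext_getElem
  · simp
  · intro k hk hk'
    have hkn : k < n := by simpa using hk'
    have := pvWrap_lt n hn i
    by_cases hkw : k = pvWrap n i
    · subst hkw
      rw [List.getElem_set_self]
      simp [hkn]
    · rw [List.getElem_set_ne (by omega)]
      simp [hkn, hkw]

lemma pvGetD_wrap (cards : List Int) (n : ℕ) (hlen : cards.length = n) (hn : 0 < n) (i : ℤ) (d : ℤ)
    (h1 : -(n:ℤ) ≤ i) (h2 : i < (n:ℤ)) :
    PySem.List.pyGetD cards i d = cards.getD (pvWrap n i) d := by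
  unfold PySem.List.pyGetD PySem.List.pyGet?
  rw [hlen, pvIdx_wrap n hn i h1 h2]
  have := pvWrap_lt n hn i
  simp [List.getD, hlen]

def pvReach (n : ℕ) (g : ℕ → ℕ) (s j : ℕ) : Prop := ∃ k < n, g^[k] s = j

def pvReachDec (n : ℕ) (g : ℕ → ℕ) (s j : ℕ) : Decidable (pvReach n g s j) :=
  decidable_of_iff ((List.range n).any (fun k => g^[k] s == j) = true)
    (by simp [pvReach, List.any_eq_true])

lemma pvReach_self (n : ℕ) (g : ℕ → ℕ) (hn : 0 < n) (s : ℕ) : pvReach n g s s :=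
  ⟨0, hn, rfl⟩

def pvF (n : ℕ) (g : ℕ → ℕ) (j : ℕ) : ℕ :=
  if hn : 0 < n then @Nat.find _ (fun s => pvReachDec n g s j) ⟨j, pvReach_self n g hn j⟩ else j

lemma pvIter_lt (n : ℕ) (g : ℕ → ℕ) (hg : ∀ u, g u < n) (k s : ℕ) (hs : s < n) :
    g^[k] s < n := by
  cases k with
  | zero => simpa
  | succ k => rw [Function.iterate_succ_apply']; exact hg _

lemma pvRepeat (n : ℕ) (g : ℕ → ℕ) (hn : 0 < n) (hg : ∀ u, g u < n) (s : ℕ) (hs : s < n) :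
    ∃ a b, a < b ∧ b ≤ n ∧ g^[a] s = g^[b] s := by
  have hmap : ∀ k ∈ Finset.range (n+1), g^[k] s ∈ Finset.range n := by
    intro k _; simpa using pvIter_lt n g hg k s hs
  obtain ⟨x, hx, y, hy, hxy, he⟩ :=
    Finset.exists_ne_map_eq_of_card_lt_of_maps_to (by simp) hmap
  simp only [Finset.mem_range] at hx hy
  rcases lt_or_gt_of_ne hxy with h | h
  · exact ⟨x, y, h, by omega, he⟩
  · exact ⟨y, x, h, by omega, he.symm⟩

lemma pvCompress (n : ℕ) (g : ℕ → ℕ) (hn : 0 < n) (hg : ∀ u, g u < n) (s : ℕ) (hs : s < n) :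
    ∀ m, ∃ k < n, g^[k] s = g^[m] s := by
  obtain ⟨a, b, hab, hbn, he⟩ := pvRepeat n g hn hg s hs
  have hshift : ∀ d : ℕ, g^[d + b] s = g^[d + a] s := by
    intro d; rw [Function.iterate_add_apply, Function.iterate_add_apply, he]
  intro m
  induction m using Nat.strong_induction_on with
  | _ m ih =>
    by_cases hm : m < n
    · exact ⟨m, hm, rfl⟩
    · have hmb : b ≤ m := by omega
      have : g^[m] s = g^[m - b + a] s := by
        have := hshift (m - b); rwa [show m - b + b = m by omega] at this
      obtain ⟨k, hk, hke⟩ := ih (m - b + a) (by omega)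
      exact ⟨k, hk, by rw [hke, this]⟩


lemma pvReach_step (n : ℕ) (g : ℕ → ℕ) (hn : 0 < n) (hg : ∀ u, g u < n) (s u : ℕ)
    (hs : s < n) (h : pvReach n g s u) : pvReach n g s (g u) := by
  obtain ⟨k, hk, he⟩ := h
  obtain ⟨k', hk', he'⟩ := pvCompress n g hn hg s hs (k+1)
  exact ⟨k', hk', by rw [he', Function.iterate_succ_apply', he]⟩

lemma pvReach_trans (n : ℕ) (g : ℕ → ℕ) (hn : 0 < n) (hg : ∀ u, g u < n) (s m u : ℕ)
    (hs : s < n) (h1 : pvReach n g s m) (h2 : pvReach n g m u) : pvReach n g s u := by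
  obtain ⟨a, _, ha⟩ := h1
  obtain ⟨b, _, hb⟩ := h2
  obtain ⟨k', hk', he'⟩ := pvCompress n g hn hg s hs (b + a)
  exact ⟨k', hk', by rw [he', Function.iterate_add_apply, ha, hb]⟩

lemma pvF_eq (n : ℕ) (g : ℕ → ℕ) (hn : 0 < n) (j : ℕ) :
    pvF n g j = @Nat.find _ (fun s => pvReachDec n g s j) ⟨j, pvReach_self n g hn j⟩ := by
  unfold pvF
  rw [dif_pos hn]

lemma pvF_reach (n : ℕ) (g : ℕ → ℕ) (hn : 0 < n) (j : ℕ) : pvReach n g (pvF n g j) j := by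
  rw [pvF_eq n g hn j]
  exact @Nat.find_spec _ (fun s => pvReachDec n g s j) ⟨j, pvReach_self n g hn j⟩

lemma pvF_le_of_reach (n : ℕ) (g : ℕ → ℕ) (hn : 0 < n) (s j : ℕ) (h : pvReach n g s j) :
    pvF n g j ≤ s := by
  rw [pvF_eq n g hn j]
  exact @Nat.find_le s _ (fun s => pvReachDec n g s j) ⟨j, pvReach_self n g hn j⟩ h

lemma pvF_le_self (n : ℕ) (g : ℕ → ℕ) (hn : 0 < n) (j : ℕ) : pvF n g j ≤ j :=
  pvF_le_of_reach n g hn j j (pvReach_self n g hn j)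

lemma pvF_not_reach (n : ℕ) (g : ℕ → ℕ) (hn : 0 < n) (s j : ℕ) (h : s < pvF n g j) :
    ¬ pvReach n g s j := by
  rw [pvF_eq n g hn j] at h
  exact @Nat.find_min _ (fun s => pvReachDec n g s j) ⟨j, pvReach_self n g hn j⟩ (m := s) h

lemma pvF_lt (n : ℕ) (g : ℕ → ℕ) (hn : 0 < n) (j : ℕ) (hj : j < n) : pvF n g j < n :=
  lt_of_le_of_lt (pvF_le_self n g hn j) hj

lemma pvF_fix (n : ℕ) (g : ℕ → ℕ) (hn : 0 < n) (hg : ∀ u, g u < n) (j : ℕ) (hj : j < n) :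
    pvF n g (pvF n g j) = pvF n g j := by
  rcases Nat.lt_or_ge (pvF n g (pvF n g j)) (pvF n g j) with h | h
  · exfalso
    have hs2 : pvF n g (pvF n g j) < n :=
      lt_of_le_of_lt (pvF_le_self n g hn _) (pvF_lt n g hn j hj)
    exact pvF_not_reach n g hn _ j h
      (pvReach_trans n g hn hg _ (pvF n g j) j hs2
        (pvF_reach n g hn (pvF n g j)) (pvF_reach n g hn j))
  · exact le_antisymm (pvF_le_self n g hn _) h

lemma pvFg_le (n : ℕ) (g : ℕ → ℕ) (hn : 0 < n) (hg : ∀ u, g u < n) (u : ℕ) (hu : u < n) :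
    pvF n g (g u) ≤ pvF n g u :=
  pvF_le_of_reach n g hn _ _
    (pvReach_step n g hn hg _ u (pvF_lt n g hn u hu) (pvF_reach n g hn u))

lemma pvF_iter_le (n : ℕ) (g : ℕ → ℕ) (hn : 0 < n) (hg : ∀ u, g u < n) (u : ℕ) (hu : u < n) :
    ∀ d, pvF n g (g^[d] u) ≤ pvF n g u := by
  intro d
  induction d with
  | zero => simp
  | succ d ih =>
    rw [Function.iterate_succ_apply']
    exact le_trans (pvFg_le n g hn hg _ (pvIter_lt n g hg d u hu)) ih
def pvStop (n : ℕ) (g : ℕ → ℕ) (i k : ℕ) : Prop :=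
  pvF n g (g^[k] i) < i ∨ ∃ k' < k, g^[k'] i = g^[k] i

def pvStopDec (n : ℕ) (g : ℕ → ℕ) (i k : ℕ) : Decidable (pvStop n g i k) := by
  unfold pvStop
  have : Decidable (∃ k' < k, g^[k'] i = g^[k] i) :=
    decidable_of_iff ((List.range k).any (fun k' => g^[k'] i == g^[k] i) = true)
      (by simp [List.any_eq_true])
  exact @instDecidableOr _ _ _ this

lemma pvStop_exists (n : ℕ) (g : ℕ → ℕ) (hn : 0 < n) (hg : ∀ u, g u < n) (i : ℕ) (hi : i < n) :
    ∃ k, k ≤ n ∧ pvStop n g i k := by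
  obtain ⟨a, b, hab, hbn, he⟩ := pvRepeat n g hn hg i hi
  exact ⟨b, hbn, Or.inr ⟨a, hab, he⟩⟩

def pvStopDec' (n : ℕ) (g : ℕ → ℕ) (i k : ℕ) : Decidable (k = n + 1 ∨ pvStop n g i k) :=
  @instDecidableOr _ _ (Nat.decEq _ _) (pvStopDec n g i k)

def pvT (n : ℕ) (g : ℕ → ℕ) (i : ℕ) : ℕ :=
  @Nat.find _ (fun k => pvStopDec' n g i k) ⟨n + 1, Or.inl rfl⟩

lemma pvT_le (n : ℕ) (g : ℕ → ℕ) (hn : 0 < n) (hg : ∀ u, g u < n) (i : ℕ) (hi : i < n) :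
    pvT n g i ≤ n := by
  obtain ⟨b, hbn, hs⟩ := pvStop_exists n g hn hg i hi
  unfold pvT
  exact le_trans (@Nat.find_le b _ (fun k => pvStopDec' n g i k) ⟨n + 1, Or.inl rfl⟩ (Or.inr hs)) hbn

lemma pvT_stop (n : ℕ) (g : ℕ → ℕ) (hn : 0 < n) (hg : ∀ u, g u < n) (i : ℕ) (hi : i < n) :
    pvStop n g i (pvT n g i) := by
  have hle := pvT_le n g hn hg i hi
  have := @Nat.find_spec _ (fun k => pvStopDec' n g i k) ⟨n + 1, Or.inl rfl⟩
  rcases this with h | h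
  · exfalso; unfold pvT at hle; omega
  · exact h

lemma pvT_min (n : ℕ) (g : ℕ → ℕ) (hn : 0 < n) (hg : ∀ u, g u < n) (i : ℕ) (hi : i < n)
    (k : ℕ) (hk : k < pvT n g i) : ¬ pvStop n g i k := by
  unfold pvT at hk
  have := @Nat.find_min _ (fun k => pvStopDec' n g i k) ⟨n + 1, Or.inl rfl⟩ k hk
  intro hs
  exact this (Or.inr hs)

-- for k < t: the path node is fresh and has label exactly i
lemma pvT_label (n : ℕ) (g : ℕ → ℕ) (hn : 0 < n) (hg : ∀ u, g u < n) (i : ℕ) (hi : i < n)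
    (k : ℕ) (hk : k < pvT n g i) : pvF n g (g^[k] i) = i := by
  have hns := pvT_min n g hn hg i hi k hk
  rw [pvStop, not_or] at hns
  have hkn : k < n := lt_of_lt_of_le hk (pvT_le n g hn hg i hi)
  have hle : pvF n g (g^[k] i) ≤ i := pvF_le_of_reach n g hn i _ ⟨k, hkn, rfl⟩
  have := hns.1
  omega

lemma pvT_inj (n : ℕ) (g : ℕ → ℕ) (hn : 0 < n) (hg : ∀ u, g u < n) (i : ℕ) (hi : i < n)
    (a b : ℕ) (ha : a < b) (hb : b < pvT n g i) : g^[a] i ≠ g^[b] i := by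
  have hns := pvT_min n g hn hg i hi b hb
  rw [pvStop, not_or] at hns
  intro he
  exact hns.2 ⟨a, ha, he⟩

-- every later path node is an early path node or already labelled < i
lemma pvT_after (n : ℕ) (g : ℕ → ℕ) (hn : 0 < n) (hg : ∀ u, g u < n) (i : ℕ) (hi : i < n) :
    ∀ m, pvT n g i ≤ m → (∃ k < pvT n g i, g^[k] i = g^[m] i) ∨ pvF n g (g^[m] i) < i := by
  have hstop := pvT_stop n g hn hg i hi
  set t := pvT n g i with ht
  rcases hstop with hcase | ⟨k₀, hk₀, he₀⟩
  · -- F (p t) < i: all later labels < i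
    intro m hm
    right
    have : g^[m] i = g^[m - t] (g^[t] i) := by
      rw [← Function.iterate_add_apply, show m - t + t = m by omega]
    rw [this]
    have hpt : g^[t] i < n := pvIter_lt n g hg t i hi
    exact lt_of_le_of_lt (pvF_iter_le n g hn hg _ hpt (m - t)) hcase
  · -- p t closes a cycle into the prefix
    intro m hm
    left
    have key : ∀ d, ∃ k < t, g^[k] i = g^[t + d] i := by
      intro d
      induction d with
      | zero => exact ⟨k₀, hk₀, by simpa using he₀⟩
      | succ d ih =>
        obtain ⟨k, hk, he⟩ := ih
        have h3 : g^[t + (d+1)] i = g^[k+1] i := by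
          calc g^[t + (d+1)] i = g (g^[t + d] i) := by
                rw [show t + (d+1) = (t + d) + 1 by omega, Function.iterate_succ_apply' g (t+d) i]
            _ = g (g^[k] i) := by rw [he]
            _ = g^[k+1] i := (Function.iterate_succ_apply' g k i).symm
        by_cases hk1 : k + 1 < t
        · exact ⟨k + 1, hk1, h3.symm⟩
        · have hkt : k + 1 = t := by omega
          have h4 : g^[t + (d+1)] i = g^[t] i := by rw [h3, hkt]
          exact ⟨k₀, hk₀, by rw [he₀, h4]⟩
    obtain ⟨k, hk, he⟩ := key (m - t)
    exact ⟨k, hk, by rwa [show t + (m - t) = m by omega] at he⟩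

lemma pvT_cover (n : ℕ) (g : ℕ → ℕ) (hn : 0 < n) (hg : ∀ u, g u < n) (i : ℕ) (hi : i < n)
    (j : ℕ) (hj : j < n) (hFj : pvF n g j = i) : ∃ k < pvT n g i, g^[k] i = j := by
  have hr : pvReach n g i j := by rw [← hFj]; exact pvF_reach n g hn j
  obtain ⟨m, hm, he⟩ := hr
  by_cases hmt : m < pvT n g i
  · exact ⟨m, hmt, he⟩
  · rcases pvT_after n g hn hg i hi m (by omega) with ⟨k, hk, hke⟩ | hlt
    · exact ⟨k, hk, by rw [hke, he]⟩
    · rw [he, hFj] at hlt; omega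

lemma pvCardFilter (N : ℕ) (P : ℕ → Bool) :
    ((Finset.range N).filter (fun j => P j = true)).card = ((List.range N).filter P).length := by
  induction N with
  | zero => simp
  | succ N ih =>
    rw [Finset.range_add_one, List.range_succ, Finset.filter_insert, List.filter_append]
    by_cases h : P N = true
    · rw [if_pos h, Finset.card_insert_of_notMem (by simp), ih]
      simp [h]
    · rw [if_neg h, ih]
      simp [h]

lemma pvT_card (n : ℕ) (g : ℕ → ℕ) (hn : 0 < n) (hg : ∀ u, g u < n) (i : ℕ) (hi : i < n) :
    pvT n g i = ((List.range n).filter (fun j => pvF n g j == i)).length := by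
  have : (Finset.range (pvT n g i)).card = ((Finset.range n).filter (fun j => (pvF n g j == i) = true)).card := by
    apply Finset.card_bij (i := fun (k : ℕ) (_ : k ∈ Finset.range (pvT n g i)) => g^[k] i)
    · intro k hk
      simp only [Finset.mem_range] at hk
      simp only [Finset.mem_filter, Finset.mem_range, beq_iff_eq]
      exact ⟨pvIter_lt n g hg k i hi, pvT_label n g hn hg i hi k hk⟩
    · intro a ha b hb he
      simp only [Finset.mem_range] at ha hb
      by_contra hne
      rcases Nat.lt_or_ge a b with h | h
      · exact pvT_inj n g hn hg i hi a b h hb he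
      · exact pvT_inj n g hn hg i hi b a (by omega) ha he.symm
    · intro j hj
      simp only [Finset.mem_filter, Finset.mem_range, beq_iff_eq] at hj
      obtain ⟨k, hk, he⟩ := pvT_cover n g hn hg i hi j hj.1 hj.2
      exact ⟨k, by simpa using hk, he⟩
  rw [← pvCardFilter n (fun j => pvF n g j == i), ← this, Finset.card_range]
-- ======== instantiation to a card list ========
def pvG (cards : List Int) (u : ℕ) : ℕ := pvWrap cards.length (cards.getD u 0 - 1)

-- A-side mark list entry after i completed starts and m inner steps of start i
def pvMk (cards : List Int) (i m u : ℕ) : ℤ :=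
  if (decide (pvF cards.length (pvG cards) u < i)
      || (List.range m).any fun k => (pvG cards)^[k] i == u) = true then 1 else 0

lemma pvG_lt (cards : List Int) (hn : 0 < cards.length) (u : ℕ) : pvG cards u < cards.length :=
  pvWrap_lt _ hn _

lemma pvCard_mem (cards : List Int)
    (hpre : ∀ c ∈ cards, 1 - (cards.length : ℤ) ≤ c ∧ c ≤ (cards.length : ℤ))
    (u : ℕ) (hu : u < cards.length) :
    1 - (cards.length : ℤ) ≤ cards.getD u 0 ∧ cards.getD u 0 ≤ (cards.length : ℤ) := by
  rw [List.getD_eq_getElem cards 0 hu]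
  exact hpre _ (List.getElem_mem hu)

-- the A walk from step m of start i
lemma pvWalkA_spec (cards : List Int) (hn : 0 < cards.length)
    (hpre : ∀ c ∈ cards, 1 - (cards.length : ℤ) ≤ c ∧ c ≤ (cards.length : ℤ))
    (i : ℕ) (hi : i < cards.length) :
    ∀ fuel m (temp : List Int) (rawj : ℤ),
      m ≤ pvT cards.length (pvG cards) i →
      pvT cards.length (pvG cards) i - m < fuel →
      -(cards.length : ℤ) ≤ rawj → rawj < (cards.length : ℤ) →
      pvWrap cards.length rawj = (pvG cards)^[m] i →
      ∃ L : List Int,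
        pvWalkA cards ((List.range cards.length).map (pvMk cards i m)) temp rawj fuel
          = ((List.range cards.length).map (pvMk cards i (pvT cards.length (pvG cards) i)), temp ++ L)
        ∧ L.length = pvT cards.length (pvG cards) i - m := by
  set n := cards.length with hnn
  set g := pvG cards with hgg
  have hg : ∀ u, g u < n := pvG_lt cards hn
  intro fuel
  induction fuel with
  | zero => intro m temp rawj h1 h2; omega
  | succ fuel ih =>
    intro m temp rawj hm hf hr1 hr2 hw
    set t := pvT n g i with htt
    by_cases hmt : m = t
    · -- marked: stop
      have hstopm : pvStop n g i m := by rw [hmt, htt]; exact pvT_stop n g hn hg i hi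
      have hget : PySem.List.pyGetD ((List.range n).map (pvMk cards i m)) rawj 1
          = pvMk cards i m (g^[m] i) := by
        rw [pvGetD_mapRange n hn _ rawj 1 hr1 hr2, hw]
      have hone : pvMk cards i m (g^[m] i) = 1 := by
        unfold pvMk
        rw [if_pos]
        simp only [Bool.or_eq_true, decide_eq_true_eq, List.any_eq_true, List.mem_range, beq_iff_eq]
        rcases hstopm with h | ⟨k, hk, he⟩
        · left; exact h
        · right; exact ⟨k, hk, he⟩
      refine ⟨[], ?_, by rw [List.length_nil, hmt]; omega⟩
      rw [pvWalkA, if_neg (by rw [hget, hone]; norm_num), hmt]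
      simp
    · -- unmarked: take a step
      have hmt' : m < t := by omega
      have hmn : m < n := lt_of_lt_of_le hmt' (pvT_le cards.length (pvG cards) hn hg i hi)
      have hnostop := pvT_min n g hn hg i hi m hmt'
      rw [pvStop, not_or] at hnostop
      have hget : PySem.List.pyGetD ((List.range n).map (pvMk cards i m)) rawj 1
          = pvMk cards i m (g^[m] i) := by
        rw [pvGetD_mapRange n hn _ rawj 1 hr1 hr2, hw]
      have hzero : pvMk cards i m (g^[m] i) = 0 := by
        unfold pvMk
        rw [if_neg]
        simp only [Bool.or_eq_true, decide_eq_true_eq, List.any_eq_true, List.mem_range, beq_iff_eq]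
        rintro (h | ⟨k, hk, he⟩)
        · exact hnostop.1 h
        · exact hnostop.2 ⟨k, hk, he⟩
      -- the card value read
      have hcv : PySem.List.pyGetD cards rawj 0 = cards.getD (g^[m] i) 0 := by
        rw [pvGetD_wrap cards n rfl hn rawj 0 hr1 hr2, hw]
      have hbounds := pvCard_mem cards hpre (g^[m] i) (pvIter_lt n g hg m i hi)
      -- the updated mark list
      have hset : PySem.List.pySetD ((List.range n).map (pvMk cards i m)) rawj 1
          = (List.range n).map (pvMk cards i (m+1)) := by
        rw [pvSetD_mapRange n hn _ rawj 1 hr1 hr2, hw]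
        apply List.map_congr_left
        intro u _
        by_cases hu : u = g^[m] i
        · subst hu
          rw [if_pos rfl]
          unfold pvMk
          rw [if_pos]
          simp only [Bool.or_eq_true, List.any_eq_true, List.mem_range, beq_iff_eq]
          right; exact ⟨m, by omega, rfl⟩
        · rw [if_neg hu]
          unfold pvMk
          congr 1
          simp only [eq_iff_iff, Bool.or_eq_true, decide_eq_true_eq, List.any_eq_true,
            List.mem_range, beq_iff_eq]
          constructor
          · rintro (h | ⟨k, hk, he⟩)
            · left; exact h
            · right; exact ⟨k, by omega, he⟩
          · rintro (h | ⟨k, hk, he⟩)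
            · left; exact h
            · right
              refine ⟨k, by
                rcases Nat.lt_or_ge k m with h' | h'
                · omega
                · exfalso; have : k = m := by omega
                  subst this; exact hu he.symm, he⟩
      -- step and recurse
      obtain ⟨L, hL, hLlen⟩ := ih (m+1) (temp ++ [cards.getD (g^[m] i) 0])
        (cards.getD (g^[m] i) 0 - 1) (by omega) (by omega) (by omega) (by omega)
        (by
          rw [Function.iterate_succ_apply' g m i, hgg]
          unfold pvG
          rw [← hnn])
      refine ⟨cards.getD (g^[m] i) 0 :: L, ?_, by simp [hLlen]; omega⟩
      rw [pvWalkA, if_pos (by rw [hget, hzero]), hset, hcv, hL]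
      simp

lemma pvT_zero_iff (n : ℕ) (g : ℕ → ℕ) (hn : 0 < n) (hg : ∀ u, g u < n) (i : ℕ) (hi : i < n) :
    pvT n g i = 0 ↔ pvF n g i < i := by
  constructor
  · intro h
    have := pvT_stop n g hn hg i hi
    rw [h] at this
    rcases this with h' | ⟨k, hk, _⟩
    · simpa using h'
    · omega
  · intro h
    by_contra hne
    exact (pvT_min n g hn hg i hi 0 (by omega)) (Or.inl (by simpa using h))

lemma pvMk_shift (cards : List Int) (hn : 0 < cards.length) (i : ℕ) (hi : i < cards.length)
    (u : ℕ) (hu : u < cards.length) :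
    pvMk cards i (pvT cards.length (pvG cards) i) u = pvMk cards (i+1) 0 u := by
  have hg : ∀ v, pvG cards v < cards.length := pvG_lt cards hn
  unfold pvMk
  congr 1
  simp only [eq_iff_iff, Bool.or_eq_true, decide_eq_true_eq, List.any_eq_true, List.mem_range,
    beq_iff_eq, List.range_zero, List.not_mem_nil, false_and, exists_false, or_false]
  constructor
  · rintro (h | ⟨k, hk, he⟩)
    · omega
    · have := pvT_label cards.length (pvG cards) hn hg i hi k hk
      rw [he] at this
      omega
  · intro h
    rcases Nat.lt_or_ge (pvF cards.length (pvG cards) u) i with h' | h'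
    · left; exact h'
    · have hFu : pvF cards.length (pvG cards) u = i := by omega
      obtain ⟨k, hk, he⟩ := pvT_cover cards.length (pvG cards) hn hg i hi u hu hFu
      right; exact ⟨k, hk, he⟩

lemma pvFoldA (cards : List Int) (hn : 0 < cards.length)
    (hpre : ∀ c ∈ cards, 1 - (cards.length : ℤ) ≤ c ∧ c ≤ (cards.length : ℤ)) :
    ∀ i, i ≤ cards.length →
      (List.range i).foldl
        (fun (st : List Int × List Int) i =>
          let w := pvWalkA cards st.1 [] ((i : ℕ) : ℤ) (cards.length + 1)
          if w.2 ≠ [] then (w.1, st.2 ++ [(w.2.length : ℤ)]) else (w.1, st.2))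
        (List.replicate cards.length 0, [])
      = ((List.range cards.length).map (pvMk cards i 0),
         ((List.range i).filter (fun s => pvF cards.length (pvG cards) s == s)).map
           (fun s => ((pvT cards.length (pvG cards) s : ℕ) : ℤ))) := by
  have hg : ∀ v, pvG cards v < cards.length := pvG_lt cards hn
  intro i
  induction i with
  | zero =>
    intro _
    simp only [List.range_zero, List.foldl_nil, List.filter_nil, List.map_nil]
    have h0 : (List.range cards.length).map (pvMk cards 0 0) = List.replicate cards.length 0 := by
      apply List.ext_getElem (by simp)
      intro k hk hk'
      simp only [List.length_map, List.length_range] at hk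
      simp [pvMk]
    rw [h0]
  | succ i ih =>
    intro hi1
    have hi : i < cards.length := by omega
    rw [List.range_succ, List.foldl_append, List.foldl_cons, List.foldl_nil, ih (by omega)]
    obtain ⟨L, hEq, hLen⟩ := pvWalkA_spec cards hn hpre i hi (cards.length+1) 0 []
      ((i : ℕ) : ℤ) (by omega) (by have := pvT_le cards.length (pvG cards) hn hg i hi; omega)
      (by push_cast; omega) (by push_cast; omega)
      (by simpa using pvWrap_coe cards.length i hi)
    simp only []
    rw [hEq]
    have hmark : (List.range cards.length).map (pvMk cards i (pvT cards.length (pvG cards) i)) = (List.range cards.length).map (pvMk cards (i+1) 0) :=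
      List.map_congr_left (fun u hu => pvMk_shift cards hn i hi u (by simpa using hu))
    rw [List.nil_append] at *
    by_cases ht0 : pvT cards.length (pvG cards) i = 0
    · have : L = [] := by rw [← List.length_eq_zero_iff]; omega
      subst this
      rw [if_neg (by simp)]
      have hne : pvF cards.length (pvG cards) i ≠ i := by
        have := (pvT_zero_iff cards.length (pvG cards) hn hg i hi).1 ht0
        omega
      have hfil : ((List.range i) ++ [i]).filter (fun s => pvF cards.length (pvG cards) s == s)
          = (List.range i).filter (fun s => pvF cards.length (pvG cards) s == s) := by
        rw [List.filter_append]
        simp [hne]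
      rw [hfil, hmark]
    · have hLne : L ≠ [] := by
        intro h
        apply ht0
        rw [h] at hLen
        simp only [List.length_nil] at hLen
        omega
      rw [if_pos (by simpa using hLne)]
      have hFi : pvF cards.length (pvG cards) i = i := by
        have h1 : ¬ (pvF cards.length (pvG cards) i < i) := fun h => ht0 ((pvT_zero_iff cards.length (pvG cards) hn hg i hi).2 h)
        have h2 := pvF_le_self cards.length (pvG cards) hn i
        omega
      have hfil : ((List.range i) ++ [i]).filter (fun s => pvF cards.length (pvG cards) s == s)
          = (List.range i).filter (fun s => pvF cards.length (pvG cards) s == s) ++ [i] := by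
        rw [List.filter_append]
        simp [hFi]
      rw [hfil, hmark, List.map_append]
      have : (L.length : ℤ) = ((pvT cards.length (pvG cards) i : ℕ) : ℤ) := by rw [hLen]; norm_num
      rw [this]
      simp

-- B-side entry of the first/label list for start s after k inner steps
def pvE (cards : List Int) (s k u : ℕ) : ℤ :=
  if pvF cards.length (pvG cards) u < s then (pvF cards.length (pvG cards) u : ℤ)
  else if ((List.range k).any fun e => (pvG cards)^[e] s == u) then (s : ℤ) else (u : ℤ)

lemma pvInnerB (cards : List Int) (hn : 0 < cards.length)
    (hpre : ∀ c ∈ cards, 1 - (cards.length : ℤ) ≤ c ∧ c ≤ (cards.length : ℤ))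
    (s : ℕ) (hs : s < cards.length) :
    ∀ k, k ≤ cards.length →
      ∃ raw : ℤ,
        (List.range k).foldl
          (fun (st : List Int × Int) _ =>
            (PySem.List.pySetD st.1 st.2 (min (PySem.List.pyGetD st.1 st.2 0) ((s : ℕ) : ℤ)),
             PySem.List.pyGetD cards st.2 0 - 1))
          ((List.range cards.length).map (pvE cards s 0), ((s : ℕ) : ℤ))
        = ((List.range cards.length).map (pvE cards s k), raw)
        ∧ -(cards.length : ℤ) ≤ raw ∧ raw < (cards.length : ℤ)
        ∧ pvWrap cards.length raw = (pvG cards)^[k] s := by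
  have hg : ∀ v, pvG cards v < cards.length := pvG_lt cards hn
  intro k
  induction k with
  | zero =>
    intro _
    refine ⟨((s : ℕ) : ℤ), by simp, by push_cast; omega, by push_cast; omega, ?_⟩
    simpa using pvWrap_coe cards.length s hs
  | succ k ih =>
    intro hk1
    have hk : k < cards.length := by omega
    obtain ⟨raw, hEq, hr1, hr2, hw⟩ := ih (by omega)
    rw [List.range_succ, List.foldl_append, hEq, List.foldl_cons, List.foldl_nil]
    have hget : PySem.List.pyGetD ((List.range cards.length).map (pvE cards s k)) raw 0
        = pvE cards s k ((pvG cards)^[k] s) := by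
      rw [pvGetD_mapRange cards.length hn _ raw 0 hr1 hr2, hw]
    have hcv : PySem.List.pyGetD cards raw 0 = cards.getD ((pvG cards)^[k] s) 0 := by
      rw [pvGetD_wrap cards cards.length rfl hn raw 0 hr1 hr2, hw]
    have hbounds := pvCard_mem cards hpre ((pvG cards)^[k] s) (pvIter_lt cards.length (pvG cards) hg k s hs)
    have hset : PySem.List.pySetD ((List.range cards.length).map (pvE cards s k)) raw
          (min (pvE cards s k ((pvG cards)^[k] s)) ((s : ℕ) : ℤ))
        = (List.range cards.length).map (pvE cards s (k+1)) := by
      rw [pvSetD_mapRange cards.length hn _ raw _ hr1 hr2, hw]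
      apply List.map_congr_left
      intro u _
      by_cases hu : u = (pvG cards)^[k] s
      · rw [if_pos hu, ← hu]
        unfold pvE
        by_cases hF : pvF cards.length (pvG cards) u < s
        · rw [if_pos hF, if_pos hF]
          have : ((pvF cards.length (pvG cards) u : ℕ) : ℤ) ≤ ((s : ℕ) : ℤ) := by
            push_cast; omega
          rw [min_eq_left this]
        · rw [if_neg hF, if_neg hF]
          have hus : s ≤ u := le_trans (Nat.le_of_not_lt hF) (pvF_le_self cards.length (pvG cards) hn u)
          rw [if_pos (show ((List.range (k+1)).any fun e => (pvG cards)^[e] s == u) = true by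
            simp only [List.any_eq_true, List.mem_range, beq_iff_eq]; exact ⟨k, by omega, hu.symm⟩)]
          by_cases ha : ((List.range k).any fun e => (pvG cards)^[e] s == u) = true
          · rw [if_pos ha]; simp
          · rw [if_neg ha]
            have : ((s : ℕ) : ℤ) ≤ ((u : ℕ) : ℤ) := by push_cast; omega
            rw [min_eq_right this]
      · rw [if_neg hu]
        unfold pvE
        have hiff : ((List.range k).any fun e => (pvG cards)^[e] s == u)
            = ((List.range (k+1)).any fun e => (pvG cards)^[e] s == u) := by
          rw [Bool.eq_iff_iff]
          simp only [List.any_eq_true, List.mem_range, beq_iff_eq]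
          constructor
          · rintro ⟨e, he, hee⟩
            exact ⟨e, by omega, hee⟩
          · rintro ⟨e, he, hee⟩
            refine ⟨e, ?_, hee⟩
            rcases Nat.lt_or_ge e k with h' | h'
            · omega
            · exfalso
              have hek : e = k := by omega
              subst hek
              exact hu hee.symm
        rw [hiff]
    rw [hget, hset, hcv]
    refine ⟨cards.getD ((pvG cards)^[k] s) 0 - 1, rfl, by omega, by omega, ?_⟩
    rw [Function.iterate_succ_apply' (pvG cards) k s]
    unfold pvG
    rfl

lemma pvE_shift (cards : List Int) (hn : 0 < cards.length) (s : ℕ) (hs : s < cards.length)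
    (u : ℕ) (hu : u < cards.length) :
    pvE cards s cards.length u = pvE cards (s+1) 0 u := by
  have hg : ∀ v, pvG cards v < cards.length := pvG_lt cards hn
  unfold pvE
  by_cases hF : pvF cards.length (pvG cards) u < s
  · rw [if_pos hF, if_pos (by omega)]
  · rw [if_neg hF]
    by_cases ha : ((List.range cards.length).any fun e => (pvG cards)^[e] s == u) = true
    · rw [if_pos ha]
      have hreach : pvReach cards.length (pvG cards) s u := by
        simp only [List.any_eq_true, List.mem_range, beq_iff_eq] at ha
        exact ha
      have hFu : pvF cards.length (pvG cards) u = s := by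
        have := pvF_le_of_reach cards.length (pvG cards) hn s u hreach
        omega
      rw [if_pos (by omega), hFu]
    · rw [if_neg ha]
      have hFu : ¬ (pvF cards.length (pvG cards) u < s + 1) := by
        intro h
        have hFs : pvF cards.length (pvG cards) u = s := by omega
        apply ha
        simp only [List.any_eq_true, List.mem_range, beq_iff_eq]
        have := pvF_reach cards.length (pvG cards) hn u
        rw [hFs] at this
        exact this
      rw [if_neg hFu]
      simp

lemma pvFoldB (cards : List Int) (hn : 0 < cards.length)
    (hpre : ∀ c ∈ cards, 1 - (cards.length : ℤ) ≤ c ∧ c ≤ (cards.length : ℤ)) :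
    ∀ s, s ≤ cards.length →
      (List.range s).foldl
        (fun (f : List Int) s =>
          ((List.range cards.length).foldl
            (fun (st : List Int × Int) _ =>
              (PySem.List.pySetD st.1 st.2 (min (PySem.List.pyGetD st.1 st.2 0) ((s : ℕ) : ℤ)),
               PySem.List.pyGetD cards st.2 0 - 1))
            (f, ((s : ℕ) : ℤ))).1)
        ((List.range cards.length).map (fun j => ((j : ℕ) : ℤ)))
      = (List.range cards.length).map (pvE cards s 0) := by
  intro s
  induction s with
  | zero =>
    intro _
    simp only [List.range_zero, List.foldl_nil]
    apply List.map_congr_left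
    intro u _
    unfold pvE
    simp
  | succ s ih =>
    intro hs1
    have hs : s < cards.length := by omega
    rw [List.range_succ, List.foldl_append, ih (by omega), List.foldl_cons, List.foldl_nil]
    obtain ⟨raw, hEq, _, _, _⟩ := pvInnerB cards hn hpre s hs cards.length (le_refl _)
    rw [hEq]
    exact List.map_congr_left (fun u hu => pvE_shift cards hn s hs u (by simpa using hu))

lemma pvFirst_eq (cards : List Int) (hn : 0 < cards.length) :
    (List.range cards.length).map (pvE cards cards.length 0)
      = (List.range cards.length).map (fun u => ((pvF cards.length (pvG cards) u : ℕ) : ℤ)) := by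
  apply List.map_congr_left
  intro u hu
  unfold pvE
  rw [if_pos]
  have := pvF_le_self cards.length (pvG cards) hn u
  simp only [List.mem_range] at hu
  omega

lemma pvOfList_append (xs : List Int) (x : Int) :
    PySem.Set.ofList (xs ++ [x]) = PySem.Set.add (PySem.Set.ofList xs) x := by
  rw [PySem.Set.ofList, PySem.Set.ofList, List.foldl_append, List.foldl_cons, List.foldl_nil]

lemma pvOfList (N : ℕ) (G : ℕ → ℕ) (hle : ∀ u, u < N → G u ≤ u) (hid : ∀ u, u < N → G (G u) = G u) :
    PySem.Set.ofList ((List.range N).map (fun u => ((G u : ℕ) : ℤ)))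
      = ((List.range N).filter (fun u => G u == u)).map (fun u => ((u : ℕ) : ℤ)) := by
  induction N with
  | zero => simp [PySem.Set.ofList, PySem.Set.empty]
  | succ N ih =>
    rw [List.range_succ, List.map_append]
    simp only [List.map_cons, List.map_nil]
    rw [pvOfList_append, List.filter_append,
      ih (fun u hu => hle u (by omega)) (fun u hu => hid u (by omega))]
    by_cases hGN : G N = N
    · have hnc : PySem.Set.contains
          (((List.range N).filter (fun u => G u == u)).map (fun u => ((u : ℕ) : ℤ))) ((G N : ℕ) : ℤ) = false := by
        rw [PySem.Set.contains]
        rw [List.contains_eq_any_beq]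
        simp only [List.any_eq_false]
        intro a ha hbeq
        simp only [List.mem_map, List.mem_filter, List.mem_range] at ha
        obtain ⟨u, ⟨hu, _⟩, hcast⟩ := ha
        rw [← hcast] at hbeq
        simp only [beq_iff_eq, Int.natCast_inj] at hbeq
        omega
      rw [PySem.Set.add, hnc]
      simp [hGN]
    · have hlt : G N < N := by have := hle N (by omega); omega
      have hc : PySem.Set.contains
          (((List.range N).filter (fun u => G u == u)).map (fun u => ((u : ℕ) : ℤ))) ((G N : ℕ) : ℤ) = true := by
        rw [PySem.Set.contains, List.contains_eq_any_beq]
        simp only [List.any_eq_true]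
        refine ⟨((G N : ℕ) : ℤ), ?_, by simp⟩
        simp only [List.mem_map, List.mem_filter, List.mem_range]
        exact ⟨G N, ⟨hlt, by rw [hid N (by omega)]; simp⟩, rfl⟩
      rw [PySem.Set.add, hc]
      simp [hGN]

lemma pvCount (n : ℕ) (Fn : ℕ → ℕ) (i : ℕ) :
    List.count ((i : ℕ) : ℤ) ((List.range n).map (fun u => ((Fn u : ℕ) : ℤ)))
      = ((List.range n).filter (fun j => Fn j == i)).length := by
  rw [List.count, List.countP_map, ← List.countP_eq_length_filter]
  apply List.countP_congr
  intro u _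
  simp [Function.comp]

-- the two pre-sort answer lists agree
lemma pvAns_eq (cards : List Int) (hn : 0 < cards.length)
    (hpre : ∀ c ∈ cards, 1 - (cards.length : ℤ) ≤ c ∧ c ≤ (cards.length : ℤ)) :
    ((List.range cards.length).filter (fun s => pvF cards.length (pvG cards) s == s)).map
        (fun s => ((pvT cards.length (pvG cards) s : ℕ) : ℤ))
      = (PySem.Dict.counter ((List.range cards.length).map
          (fun u => ((pvF cards.length (pvG cards) u : ℕ) : ℤ)))).values := by
  have hg : ∀ v, pvG cards v < cards.length := pvG_lt cards hn
  rw [PySem.Dict.values, PySem.Dict.items_counter, List.map_map,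
    pvOfList cards.length (pvF cards.length (pvG cards))
      (fun u _ => pvF_le_self cards.length (pvG cards) hn u)
      (fun u hu => pvF_fix cards.length (pvG cards) hn hg u hu),
    List.map_map]
  apply List.map_congr_left
  intro u hu
  simp only [List.mem_filter, List.mem_range, beq_iff_eq] at hu
  simp only [Function.comp_apply]
  rw [pvCount cards.length (pvF cards.length (pvG cards)) u,
    ← pvT_card cards.length (pvG cards) hn hg u hu.1]

theorem pvMain (cards : List Int)
    (hpre : ∀ c ∈ cards, 1 - (cards.length : ℤ) ≤ c ∧ c ≤ (cards.length : ℤ)) :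
    solution cards = solution_alt cards := by
  by_cases hn0 : cards.length = 0
  · have : cards = [] := List.length_eq_zero_iff.mp hn0
    subst this
    rfl
  · have hn : 0 < cards.length := Nat.pos_of_ne_zero hn0
    simp only [solution, solution_alt]
    rw [pvFoldA cards hn hpre cards.length (le_refl _),
        pvFoldB cards hn hpre cards.length (le_refl _),
        pvFirst_eq cards hn,
        PySem.Dict.foldl_insert_getD_add_one_eq_counter,
        ← pvAns_eq cards hn hpre]
    set V := ((List.range cards.length).filter (fun s => pvF cards.length (pvG cards) s == s)).map
        (fun s => ((pvT cards.length (pvG cards) s : ℕ) : ℤ)) with hV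
    by_cases hv : V.length ≤ 1
    · rw [if_pos hv, if_neg (by rw [PySem.List.length_sorted]; omega)]
    · rw [if_neg hv, if_pos (by rw [PySem.List.length_sorted]; omega)]

-- ===== VERDICT (by name: the statement is the Claim_ definition above) =====
theorem solution_spec : Claim_equal_solution := by
  intro cards _ hpre
  exact pvMain cards hpre
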